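-- pv_equiv track=rewrite | github.com/uurrnn/kyp0l | scrapers/lrc_interim.py | _pick_agenda_index
-- ===== SOURCE A (Python) =====
-- def _pick_agenda_index(attachments: list[tuple[str, str]]) -> int:
--     """Return the index of the agenda PDF, or 0 to fall back to the first item."""
--     for i, (fname, url) in enumerate(attachments):
--         low = fname.lower()
--         if "agenda" in low and url.lower().endswith(".pdf"):
--             return i
--     # Fallback: first PDF
--     for i, (_, url) in enumerate(attachments):
--         if url.lower().endswith(".pdf"):
--             return i
--     return 0
-- ===== SOURCE B (Python) =====
-- def _pick_agenda_index(attachments: list[tuple[str, str]]) -> int: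
--     """Return the index of the agenda PDF, or 0 to fall back to the first item."""
--     first_pdf = None
--     for i, (fname, url) in enumerate(attachments):
--         is_pdf = url.lower().endswith(".pdf")
--         if is_pdf and "agenda" in fname.lower():
--             return i
--         if is_pdf and first_pdf is None:
--             first_pdf = i
--     return first_pdf if first_pdf is not None else 0
-- ===== Notes on version B (the rewrite author's own statement) =====
-- stated objective: simpler
-- what changed: Replaced A's two sequential scans with a single pass that returns an agenda PDF immediately and remembers the first PDF seen as the fallback.
import Mathlib
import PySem

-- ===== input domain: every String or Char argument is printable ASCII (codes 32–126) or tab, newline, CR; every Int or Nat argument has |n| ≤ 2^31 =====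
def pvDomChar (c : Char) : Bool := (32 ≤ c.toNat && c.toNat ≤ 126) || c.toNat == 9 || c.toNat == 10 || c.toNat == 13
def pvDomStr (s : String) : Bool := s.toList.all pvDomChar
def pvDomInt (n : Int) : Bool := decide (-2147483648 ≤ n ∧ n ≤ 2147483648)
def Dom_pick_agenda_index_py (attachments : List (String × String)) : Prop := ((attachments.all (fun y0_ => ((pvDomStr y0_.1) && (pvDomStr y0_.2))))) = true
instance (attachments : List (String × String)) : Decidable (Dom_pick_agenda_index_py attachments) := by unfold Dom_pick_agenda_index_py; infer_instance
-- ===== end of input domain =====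

-- B replaces A's two sequential scans by a single pass that remembers the first PDF as a live fallback (objective: simpler).

-- ===== PORT A =====
-- first loop: return i on the first attachment with "agenda" in fname.lower() and a .pdf url
def pvA_loop1 (l : List (Int × String × String)) : Option Int :=
  match l with
  | [] => none
  | (i, fname, url) :: rest =>
    let low := PySem.Str.lower fname
    if PySem.Str.isIn "agenda" low && PySem.Str.endswith (PySem.Str.lower url) ".pdf" then some i
    else pvA_loop1 rest

-- second loop: return i on the first attachment with a .pdf url
def pvA_loop2 (l : List (Int × String × String)) : Option Int :=
  match l with
  | [] => none
  | (i, _, url) :: rest =>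
    if PySem.Str.endswith (PySem.Str.lower url) ".pdf" then some i
    else pvA_loop2 rest

def pick_agenda_index_py (attachments : List (String × String)) : Int :=
  match pvA_loop1 (PySem.List.enumerate attachments) with
  | some i => i
  | none =>
    match pvA_loop2 (PySem.List.enumerate attachments) with
    | some i => i
    | none => 0

-- ===== PORT B =====
-- single pass; first_pdf is the remembered fallback
def pvB_loop (first_pdf : Option Int) (l : List (Int × String × String)) : Int :=
  match l with
  | [] => match first_pdf with | some j => j | none => 0
  | (i, fname, url) :: rest =>
    let is_pdf := PySem.Str.endswith (PySem.Str.lower url) ".pdf"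
    if is_pdf && PySem.Str.isIn "agenda" (PySem.Str.lower fname) then i
    else pvB_loop (if is_pdf && first_pdf.isNone then some i else first_pdf) rest

def pick_agenda_index_py_alt (attachments : List (String × String)) : Int :=
  pvB_loop none (PySem.List.enumerate attachments)

-- ===== PRECONDITION & SPEC =====
def Spec_pick_agenda_index_py (attachments : List (String × String)) (out : Int) : Prop := out = pick_agenda_index_py_alt attachments
instance (attachments : List (String × String)) (out : Int) : Decidable (Spec_pick_agenda_index_py attachments out) := by unfold Spec_pick_agenda_index_py; infer_instance

-- ===== CLAIM (what is proved, stated in full; the proofs are below) =====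
def Claim_equal_pick_agenda_index_py : Prop := ∀ (attachments : List (String × String)), Dom_pick_agenda_index_py attachments → Spec_pick_agenda_index_py attachments (pick_agenda_index_py attachments)

-- ===== LEMMAS AND PROOFS =====

/-- The single pass equals: first agenda-PDF if any, else the remembered fallback,
    else the first PDF of the rest, else 0. -/
theorem pvB_loop_eq (l : List (Int × String × String)) (fp : Option Int) :
    pvB_loop fp l =
      match pvA_loop1 l with
      | some i => i
      | none => match fp.or (pvA_loop2 l) with | some j => j | none => 0 := by
  induction l generalizing fp with
  | nil => cases fp <;> simp [pvB_loop, pvA_loop1, pvA_loop2]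
  | cons hd tl ih =>
    obtain ⟨i, fname, url⟩ := hd
    by_cases hpdf : PySem.Str.endswith (PySem.Str.lower url) ".pdf" = true
    · by_cases hag : PySem.Str.isIn "agenda" (PySem.Str.lower fname) = true
      · simp only [pvB_loop, pvA_loop1, hpdf, hag]
        simp
      · rw [Bool.not_eq_true] at hag
        cases fp <;>
          simp only [pvB_loop, pvA_loop1, pvA_loop2, hpdf, hag] <;>
            simp [ih, Option.or]
    · rw [Bool.not_eq_true] at hpdf
      cases fp <;>
        simp only [pvB_loop, pvA_loop1, pvA_loop2, hpdf] <;>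
          simp [ih, Option.or]

theorem pick_agenda_ports_eq (attachments : List (String × String)) :
    pick_agenda_index_py attachments = pick_agenda_index_py_alt attachments := by
  unfold pick_agenda_index_py pick_agenda_index_py_alt
  rw [pvB_loop_eq]
  cases pvA_loop1 (PySem.List.enumerate attachments) <;>
    cases h2 : pvA_loop2 (PySem.List.enumerate attachments) <;>
      simp [Option.or]

-- ===== VERDICT (by name: the statement is the Claim_ definition above) =====
theorem pick_agenda_index_py_spec : Claim_equal_pick_agenda_index_py := by
  intro attachments _
  unfold Spec_pick_agenda_index_py
  exact pick_agenda_ports_eq attachments
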